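-- pv_equiv track=rewrite | github.com/Mateusz-Marciniuk/geometria_app | app.py | find_starting_point
-- ===== SOURCE A (Python) =====
-- def find_starting_point(points):
--     current_min_point = points[0]
--     for point in points:
--         if point['y'] < current_min_point['y']:
--             current_min_point = point
--         elif point['y'] == current_min_point['y']:
--             if point['x'] < current_min_point['x']:
--                 current_min_point = point
--     return current_min_point
-- ===== SOURCE B (Python) =====
-- def find_starting_point(points):
--     return sorted(points, key=lambda p: (p['y'], p['x']))[0]
-- ===== Notes on version B (the rewrite author's own statement) =====
-- stated objective: idiomatic
-- what changed: Replaces the manual min-tracking loop (compare y, tie-break on x) with a stable sort by the tuple key (p['y'], p['x']) and taking the first element.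
-- outside the precondition, e.g. on find_starting_point([{'x': 0, 'y': 0}, {'y': 1}]): A returns {'x': 0, 'y': 0}, B raises KeyError
import Mathlib
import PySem

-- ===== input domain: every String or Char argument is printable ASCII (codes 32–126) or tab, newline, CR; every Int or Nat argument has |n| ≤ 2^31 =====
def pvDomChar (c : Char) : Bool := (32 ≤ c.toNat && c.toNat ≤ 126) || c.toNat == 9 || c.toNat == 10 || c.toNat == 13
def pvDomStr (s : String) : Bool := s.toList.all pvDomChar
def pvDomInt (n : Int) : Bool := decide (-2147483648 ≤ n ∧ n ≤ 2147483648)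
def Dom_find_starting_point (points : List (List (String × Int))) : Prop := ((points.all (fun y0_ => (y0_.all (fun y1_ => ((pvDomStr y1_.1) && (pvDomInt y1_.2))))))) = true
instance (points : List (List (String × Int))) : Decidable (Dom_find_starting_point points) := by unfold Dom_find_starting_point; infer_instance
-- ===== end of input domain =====

-- B replaces A's manual min-tracking loop by a stable sort on the tuple key (y, x) and taking
-- the first element (idiomatic; not claimed faster). Equivalence is about the return value; neither version mutates its argument.

-- ===== PORT A =====
-- dict lookup p['y'] / p['x']; key presence is guaranteed by Pre_, so the default 0 is never the result of a real lookup miss inside Pre_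
def pvGetKey (p : List (String × Int)) (k : String) : Int :=
  (PySem.Dict.mk p).getD k 0

def find_starting_point (points : List (List (String × Int))) : List (String × Int) :=
  match points with
  | [] => []   -- points[0] raises IndexError in Python: excluded by Pre_
  | p0 :: _ =>
    points.foldl (fun cur point =>
      if pvGetKey point "y" < pvGetKey cur "y" then point
      else if pvGetKey point "y" = pvGetKey cur "y" then
        if pvGetKey point "x" < pvGetKey cur "x" then point else cur
      else cur) p0

-- ===== PORT B =====
def find_starting_point_alt (points : List (List (String × Int))) : List (String × Int) :=
  (PySem.List.sorted2 points (fun p => pvGetKey p "y") (fun p => pvGetKey p "x")).headD []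
  -- [0] raises IndexError in Python on the empty list: excluded by Pre_

-- ===== PRECONDITION & SPEC =====
-- Pre_ excludes the empty list (IndexError in both) and points missing an 'x' or 'y' key:
-- there A usually raises KeyError, except that A skips the 'x' lookup on points whose y is not
-- a tie — an accident of its lazy tie-break that B's tuple sort key cannot reproduce (see cite).
def Pre_find_starting_point (points : List (List (String × Int))) : Prop :=
  points ≠ [] ∧ ∀ p ∈ points, (PySem.Dict.mk p).contains "x" = true ∧ (PySem.Dict.mk p).contains "y" = true
instance (points : List (List (String × Int))) : Decidable (Pre_find_starting_point points) := by unfold Pre_find_starting_point; infer_instance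

def pvWitness_find_starting_point : (List (List (String × Int))) := ([[("x", 1), ("y", 2)], [("x", 0), ("y", 2)]])

def Spec_find_starting_point (points : List (List (String × Int))) (out : List (String × Int)) : Prop := out = find_starting_point_alt points
instance (points : List (List (String × Int))) (out : List (String × Int)) : Decidable (Spec_find_starting_point points out) := by unfold Spec_find_starting_point; infer_instance

-- ===== CLAIM (what is proved, stated in full; the proofs are below) =====
def Claim_equal_find_starting_point : Prop := ∀ (points : List (List (String × Int))), Dom_find_starting_point points → Pre_find_starting_point points → Spec_find_starting_point points (find_starting_point points)

-- ===== LEMMAS AND PROOFS =====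

-- the Boolean "comes before" test sorted2 uses for the key pair (y, x)
def pvLt (x c : List (String × Int)) : Bool :=
  decide (pvGetKey x "y" < pvGetKey c "y") ||
    (!decide (pvGetKey c "y" < pvGetKey x "y") && decide (pvGetKey x "x" < pvGetKey c "x"))

lemma pvInsertBy_ne_nil (x : List (String × Int)) (ys : List (List (String × Int))) :
    PySem.List.insertBy pvLt x ys ≠ [] := by
  cases ys with
  | nil => simp [PySem.List.insertBy]
  | cons y t => simp only [PySem.List.insertBy]; split <;> simp

lemma pvHead_insertBy (x y : List (String × Int)) (t : List (List (String × Int))) :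
    (PySem.List.insertBy pvLt x (y :: t)).headD [] = if pvLt x y then x else y := by
  simp only [PySem.List.insertBy]; split <;> simp

-- head of the insertion-sort accumulator evolves exactly like a running "first minimum"
lemma pvHead_foldl_insertBy (xs : List (List (String × Int))) (acc : List (List (String × Int)))
    (h : acc ≠ []) :
    ((xs.foldl (fun a x => PySem.List.insertBy pvLt x a) acc).headD [])
      = xs.foldl (fun c x => if pvLt x c then x else c) (acc.headD []) := by
  induction xs generalizing acc with
  | nil => rfl
  | cons x t ih =>
    cases acc with
    | nil => exact absurd rfl h
    | cons a as =>
      simp only [List.foldl_cons]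
      rw [ih _ (pvInsertBy_ne_nil x (a :: as)), pvHead_insertBy]
      simp

-- A's update step is the same function as the "keep the pvLt-smaller" step
lemma pvStep_eq :
    (fun (cur point : List (String × Int)) =>
      if pvGetKey point "y" < pvGetKey cur "y" then point
      else if pvGetKey point "y" = pvGetKey cur "y" then
        if pvGetKey point "x" < pvGetKey cur "x" then point else cur
      else cur)
    = (fun c x => if pvLt x c then x else c) := by
  funext c x
  simp only [pvLt]
  rcases lt_trichotomy (pvGetKey x "y") (pvGetKey c "y") with h | h | h
  · simp [h, not_lt_of_gt h]
  · simp [h]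
  · simp [h, not_lt_of_gt h, ne_of_gt h]

-- ===== VERDICT (by name: the statement is the Claim_ definition above) =====
theorem find_starting_point_spec : Claim_equal_find_starting_point := by
  intro points _ hpre
  obtain ⟨hne, -⟩ := hpre
  cases points with
  | nil => exact absurd rfl hne
  | cons p0 t =>
    show find_starting_point (p0 :: t) = find_starting_point_alt (p0 :: t)
    have hB : find_starting_point_alt (p0 :: t)
        = t.foldl (fun c x => if pvLt x c then x else c) p0 := by
      show (((p0 :: t).foldl (fun a x => PySem.List.insertBy pvLt x a) [])).headD []
        = t.foldl (fun c x => if pvLt x c then x else c) p0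
      rw [List.foldl_cons]
      rw [pvHead_foldl_insertBy t (PySem.List.insertBy pvLt p0 []) (pvInsertBy_ne_nil p0 [])]
      rfl
    have hA : find_starting_point (p0 :: t)
        = t.foldl (fun c x => if pvLt x c then x else c) p0 := by
      show (p0 :: t).foldl _ p0 = _
      rw [List.foldl_cons, pvStep_eq]
      simp
    rw [hA, hB]
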